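-- pv_equiv track=rewrite | github.com/jediborre/pulpa | match/training/v12/train_v12.py | _max_scoring_run
-- ===== SOURCE A (Python) =====
-- def _max_scoring_run(events: list[dict], team_name: str) -> int:
--     best, run = 0, 0
--     for event in events:
--         team, pts = event.get("team"), int(event.get("points", 0) or 0)
--         if team == team_name and pts > 0:
--             run += pts
--             if run > best: best = run
--         elif team in ("home", "away"):
--             run = 0
--     return best
-- ===== SOURCE B (Python) =====
-- def _max_scoring_run(events: list[dict], team_name: str) -> int:
--     # Staged prefix-sum algorithm: extract (team, pts) pairs, turn them into a
--     # scoring-delta list and a list of reset boundaries, build prefix sums, and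
--     # return the maximal difference of prefix sums between consecutive boundaries.
--     pairs = [(e.get("team"), int(e.get("points", 0) or 0)) for e in events]
--     scores = [p if (t == team_name and p > 0) else 0 for (t, p) in pairs]
--     resets = [i for i, (t, p) in enumerate(pairs)
--               if not (t == team_name and p > 0) and t in ("home", "away")]
--     pre = [0]
--     for s in scores:
--         pre.append(pre[-1] + s)
--     bounds = [0] + [i + 1 for i in resets] + [len(scores)]
--     return max(pre[b2] - pre[b1] for b1, b2 in zip(bounds, bounds[1:]))
-- ===== Notes on version B (the rewrite author's own statement) =====
-- stated objective: alternative
-- what changed: B replaces A's single-pass running-maximum scan by a staged algorithm: it extracts (team, pts) pairs, derives a scoring-delta list and a list of reset boundary indices, builds a prefix-sum array, and returns the maximal difference of prefix sums between consecutive segment boundaries.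
import Mathlib
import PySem

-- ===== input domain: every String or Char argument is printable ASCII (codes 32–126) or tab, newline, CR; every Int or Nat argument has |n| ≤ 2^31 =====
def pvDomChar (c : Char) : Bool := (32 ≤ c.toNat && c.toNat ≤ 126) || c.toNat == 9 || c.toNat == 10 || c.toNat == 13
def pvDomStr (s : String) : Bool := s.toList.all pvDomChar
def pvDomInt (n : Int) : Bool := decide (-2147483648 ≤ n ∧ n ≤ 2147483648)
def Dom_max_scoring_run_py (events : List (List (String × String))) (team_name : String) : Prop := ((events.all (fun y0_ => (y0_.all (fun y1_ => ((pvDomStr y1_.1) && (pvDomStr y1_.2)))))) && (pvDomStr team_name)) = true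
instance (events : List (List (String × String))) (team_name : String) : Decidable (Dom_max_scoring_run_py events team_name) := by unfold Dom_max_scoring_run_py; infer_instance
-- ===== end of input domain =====

-- B replaces A's running-maximum scan by a staged algorithm: per-event (team, pts) pairs,
-- a scoring-delta list plus reset boundaries, prefix sums, and the answer as the maximal
-- prefix-sum difference between consecutive boundaries (alternative decomposition, same cost).


-- ===== PORT A =====
-- shared literal helpers: event.get("team") and int(event.get("points", 0) or 0)
def pvTeam (event : List (String × String)) : Option String :=
  ((List.find? (fun p => p.1 == "team") event).map (·.2))

def pvPts (event : List (String × String)) : Int :=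
  match List.find? (fun p => p.1 == "points") event with
  | none => 0
  | some p => if p.2 = "" then 0 else (PySem.Int.ofStr? p.2).getD 0  -- none (ValueError) excluded by Pre_

-- team == team_name and pts > 0
def pvScoring (tn : String) (tp : Option String × Int) : Bool :=
  tp.1 == some tn && decide (0 < tp.2)

def pvStepA (tn : String) (st : Int × Int) (tp : Option String × Int) : Int × Int :=
  if pvScoring tn tp then
    (if st.2 + tp.2 > st.1 then st.2 + tp.2 else st.1, st.2 + tp.2)
  else if tp.1 == some "home" || tp.1 == some "away" then (st.1, 0)
  else st

def max_scoring_run_py (events : List (List (String × String))) (team_name : String) : Int :=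
  (events.foldl (fun st e => pvStepA team_name st (pvTeam e, pvPts e)) (0, 0)).1

-- ===== PORT B =====
-- not (t == team_name and p > 0) and t in ("home", "away")
def pvReset (tn : String) (tp : Option String × Int) : Bool :=
  !pvScoring tn tp && (tp.1 == some "home" || tp.1 == some "away")

-- p if (t == team_name and p > 0) else 0
def pvScore (tn : String) (tp : Option String × Int) : Int :=
  if pvScoring tn tp then tp.2 else 0

def max_scoring_run_py_alt (events : List (List (String × String))) (team_name : String) : Int :=
  let pairs := events.map (fun e => (pvTeam e, pvPts e))
  let scores := pairs.map (pvScore team_name)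
  let resets := ((PySem.List.enumerate pairs 0).filter (fun ip => pvReset team_name ip.2)).map (·.1)
  let pre := scores.foldl (fun acc s => acc ++ [PySem.List.pyGetD acc (-1) 0 + s]) [0]
  let bounds := [(0 : Int)] ++ resets.map (· + 1) ++ [(scores.length : Int)]
  ((PySem.List.max? ((bounds.zip (bounds.drop 1)).map
      (fun b => PySem.List.pyGetD pre b.2 0 - PySem.List.pyGetD pre b.1 0)) (fun x => x)).getD 0)

-- ===== PRECONDITION & SPEC =====
-- Pre_ excludes exactly the inputs where int() raises ValueError: some event has a
-- non-empty "points" value that is not int-parsable (A raises there; B raises identically).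
def Pre_max_scoring_run_py (events : List (List (String × String))) (team_name : String) : Prop :=
  ∀ e ∈ events, ∀ p ∈ List.find? (fun q => q.1 == "points") e,
    p.2 = "" ∨ (PySem.Int.ofStr? p.2).isSome = true
instance (events : List (List (String × String))) (team_name : String) : Decidable (Pre_max_scoring_run_py events team_name) := by unfold Pre_max_scoring_run_py; infer_instance
def pvWitness_max_scoring_run_py : (List (List (String × String))) × String :=
  ([[("team", "home"), ("points", "3")], [("team", "away"), ("points", "2")]], "home")
def Spec_max_scoring_run_py (events : List (List (String × String))) (team_name : String) (out : Int) : Prop := out = max_scoring_run_py_alt events team_name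
instance (events : List (List (String × String))) (team_name : String) (out : Int) : Decidable (Spec_max_scoring_run_py events team_name out) := by unfold Spec_max_scoring_run_py; infer_instance

-- ===== CLAIM (what is proved, stated in full; the proofs are below) =====
def Claim_equal_max_scoring_run_py : Prop := ∀ (events : List (List (String × String))) (team_name : String), Dom_max_scoring_run_py events team_name → Pre_max_scoring_run_py events team_name → Spec_max_scoring_run_py events team_name (max_scoring_run_py events team_name)

-- ===== LEMMAS AND PROOFS =====

-- (head, tail) of the chronological list of per-segment score totals
def pvSegs (tn : String) : List (Option String × Int) → Int × List Int
  | [] => (0, [])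
  | p :: r =>
    let hr := pvSegs tn r
    if pvScoring tn p then (p.2 + hr.1, hr.2)
    else if pvReset tn p then (0, hr.1 :: hr.2)
    else hr

-- prefix sums with a leading 0 (the mathematical shape of B's `pre` list)
def pvPres : List Int → List Int
  | [] => [0]
  | s :: r => 0 :: (pvPres r).map (s + ·)

-- consecutive differences of P over a boundary list
def pvDD (P : Int → Int) : List Int → List Int
  | b1 :: b2 :: r => (P b2 - P b1) :: pvDD P (b2 :: r)
  | _ => []

lemma pvSegs_nonneg (tn : String) (r : List (Option String × Int)) :
    0 ≤ (pvSegs tn r).1 ∧ ∀ x ∈ (pvSegs tn r).2, 0 ≤ x := by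
  induction r with
  | nil => simp [pvSegs]
  | cons p r ih =>
    unfold pvSegs
    by_cases hs : pvScoring tn p = true
    · have hp : 0 < p.2 := by
        have := hs; unfold pvScoring at this; simp at this; omega
      simp only [hs, if_true]
      exact ⟨by omega, ih.2⟩
    · by_cases hr : pvReset tn p = true
      · simp only [hs, hr, if_true]
        refine ⟨le_refl 0, ?_⟩
        intro x hx
        rcases List.mem_cons.mp hx with h | h
        · exact h ▸ ih.1
        · exact ih.2 x h
      · simp only [hs, hr]
        exact ih

lemma pvA_char (tn : String) : ∀ (r : List (Option String × Int)) (best run : Int),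
    0 ≤ run → run ≤ best →
    (r.foldl (pvStepA tn) (best, run)).1
      = (pvSegs tn r).2.foldl max (max best (run + (pvSegs tn r).1)) := by
  intro r
  induction r with
  | nil =>
    intro best run h0 h1
    simp [pvSegs]
    omega
  | cons p r ih =>
    intro best run h0 h1
    rw [List.foldl_cons]
    unfold pvSegs
    by_cases hs : pvScoring tn p = true
    · have hp : 0 < p.2 := by
        have := hs; unfold pvScoring at this; simp at this; omega
      have hh : 0 ≤ (pvSegs tn r).1 := (pvSegs_nonneg tn r).1
      have hstepA : pvStepA tn (best, run) p
          = (max best (run + p.2), run + p.2) := by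
        unfold pvStepA
        simp only [hs, if_true]
        congr 1
        simp [max_def]; split_ifs <;> omega
      rw [hstepA]
      simp only [hs, if_true]
      rw [ih (max best (run + p.2)) (run + p.2) (by omega) (by omega)]
      have : max (max best (run + p.2)) (run + p.2 + (pvSegs tn r).1)
           = max best (run + (p.2 + (pvSegs tn r).1)) := by
        simp [max_def]; split_ifs <;> omega
      rw [this]
    · by_cases hr : (p.1 == some "home" || p.1 == some "away") = true
      · have hres : pvReset tn p = true := by unfold pvReset; simp [hs, hr]
        have hstepA : pvStepA tn (best, run) p = (best, 0) := by
          unfold pvStepA; simp [hs, hr]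
        rw [hstepA]
        simp only [hs, hres, if_true, Bool.false_eq_true, if_false]
        rw [ih best 0 (le_refl 0) (by omega)]
        simp only [List.foldl_cons]
        have : max (max best (run + 0)) (pvSegs tn r).1 = max best (0 + (pvSegs tn r).1) := by
          simp [max_def]; split_ifs <;> omega
        rw [← this]
      · have hres : pvReset tn p = false := by unfold pvReset; simp [hs, hr]
        have hstepA : pvStepA tn (best, run) p = (best, run) := by
          unfold pvStepA; simp [hs, hr]
        rw [hstepA]
        simp only [hs, hres, Bool.false_eq_true, if_false]
        exact ih best run h0 h1

lemma pvPres_fold (l : List Int) : ∀ (acc : List Int) (c : Int),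
    l.foldl (fun acc s => acc ++ [PySem.List.pyGetD acc (-1) 0 + s]) (acc ++ [c])
      = acc ++ (pvPres l).map (c + ·) := by
  induction l with
  | nil => intro acc c; simp [pvPres]
  | cons s r ih =>
    intro acc c
    rw [List.foldl_cons, PySem.List.pyGetD_neg_one_append_singleton]
    rw [ih (acc ++ [c]) (c + s)]
    simp [pvPres, List.map_map, add_assoc]

lemma pvPres_eq (l : List Int) :
    l.foldl (fun acc s => acc ++ [PySem.List.pyGetD acc (-1) 0 + s]) [0] = pvPres l := by
  have := pvPres_fold l [] 0
  simpa using this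

lemma pvPres_length (l : List Int) : (pvPres l).length = l.length + 1 := by
  induction l with
  | nil => simp [pvPres]
  | cons s r ih => simp [pvPres, ih]

lemma pvPres_zero (l : List Int) : PySem.List.pyGetD (pvPres l) 0 0 = 0 := by
  cases l <;> simp [pvPres, PySem.List.pyGetD_zero_cons]

lemma pvPres_succ (s : Int) (l : List Int) (b : Int) (hb : 0 ≤ b) (hb2 : b ≤ (l.length : Int)) :
    PySem.List.pyGetD (pvPres (s :: l)) (b + 1) 0 = s + PySem.List.pyGetD (pvPres l) b 0 := by
  obtain ⟨m, rfl⟩ := Int.eq_ofNat_of_zero_le hb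
  have hm : m < (pvPres l).length := by rw [pvPres_length]; exact_mod_cast by omega
  have hcast : ((m : Int) + 1) = ((m + 1 : Nat) : Int) := by push_cast; ring
  rw [hcast]
  rw [PySem.List.pyGetD_natCast, PySem.List.pyGetD_natCast]
  show (0 :: (pvPres l).map (s + ·)).getD (m + 1) 0 = s + (pvPres l).getD m 0
  rw [List.getD_cons_succ]
  rw [List.getD_eq_getElem _ _ (by simpa using hm), List.getD_eq_getElem _ _ hm]
  simp

lemma pvDD_shift (P Q : Int → Int) (s : Int) : ∀ (L : List Int),
    (∀ b ∈ L, P (b + 1) = s + Q b) → pvDD P (L.map (· + 1)) = pvDD Q L := by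
  intro L
  induction L with
  | nil => intro _; simp [pvDD]
  | cons b1 tl ih =>
    intro h
    cases tl with
    | nil => simp [pvDD]
    | cons b2 r =>
      simp only [List.map_cons]
      show pvDD P ((b1 + 1) :: (b2 + 1) :: r.map (· + 1)) = pvDD Q (b1 :: b2 :: r)
      unfold pvDD
      have h1 := h b1 (by simp)
      have h2 := h b2 (by simp)
      rw [h1, h2]
      have := ih (fun b hb => h b (by simp [List.mem_cons] at hb ⊢; tauto))
      simp only [List.map_cons] at this
      rw [this]
      ring_nf

lemma pvZip_dd (P : Int → Int) : ∀ (L : List Int),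
    (L.zip (L.drop 1)).map (fun b => P b.2 - P b.1) = pvDD P L := by
  intro L
  induction L with
  | nil => simp [pvDD]
  | cons a tl ih =>
    cases tl with
    | nil => simp [pvDD]
    | cons b r =>
      show ((a :: b :: r).zip (b :: r)).map _ = _
      simp only [List.zip_cons_cons, List.map_cons]
      unfold pvDD
      have : ((b :: r).zip ((b :: r).drop 1)).map (fun b => P b.2 - P b.1) = pvDD P (b :: r) := ih
      simpa using this

lemma pvEnum_shift {α : Type} (xs : List α) : ∀ (s : Int),
    PySem.List.enumerate xs (s + 1) = (PySem.List.enumerate xs s).map (fun q => (q.1 + 1, q.2)) := by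
  induction xs with
  | nil => intro s; simp [PySem.List.enumerate_nil]
  | cons x r ih =>
    intro s
    rw [PySem.List.enumerate_cons, PySem.List.enumerate_cons, List.map_cons, ih (s + 1)]

lemma pvResets_cons (tn : String) (p : Option String × Int) (r : List (Option String × Int)) :
    ((PySem.List.enumerate (p :: r) 0).filter (fun ip => pvReset tn ip.2)).map (·.1)
      = (if pvReset tn p then [(0 : Int)] else [])
        ++ (((PySem.List.enumerate r 0).filter (fun ip => pvReset tn ip.2)).map (·.1)).map (· + 1) := by
  rw [PySem.List.enumerate_cons, pvEnum_shift r 0]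
  rw [List.filter_cons]
  by_cases hp : pvReset tn p = true
  · simp only [hp, if_true, List.map_cons]
    congr 1
    rw [List.filter_map, List.map_map, List.map_map]
    rfl
  · simp only [hp]
    simp only [Bool.false_eq_true, if_false]
    rw [List.filter_map, List.map_map, List.map_map]
    simp
    rfl

lemma pvResets_mem (tn : String) (pairs : List (Option String × Int)) (b : Int)
    (hb : b ∈ ((PySem.List.enumerate pairs 0).filter (fun ip => pvReset tn ip.2)).map (·.1)) :
    0 ≤ b ∧ b + 1 ≤ (pairs.length : Int) := by
  rcases List.mem_map.mp hb with ⟨ip, hipmem, rfl⟩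
  have hmem := List.mem_of_mem_filter hipmem
  rcases (PySem.List.mem_enumerate_iff _ _ _).mp hmem with ⟨k, hk, rfl⟩
  simp only [zero_add]
  constructor
  · exact_mod_cast Nat.zero_le k
  · exact_mod_cast hk

lemma pvB_char (tn : String) : ∀ (pairs : List (Option String × Int)),
    pvDD (fun b => PySem.List.pyGetD (pvPres (pairs.map (pvScore tn))) b 0)
       ((0 : Int) :: ((((PySem.List.enumerate pairs 0).filter (fun ip => pvReset tn ip.2)).map (·.1)).map (· + 1)
          ++ [(pairs.length : Int)]))
      = (pvSegs tn pairs).1 :: (pvSegs tn pairs).2 := by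
  intro pairs
  induction pairs with
  | nil =>
    simp [PySem.List.enumerate_nil, pvDD, pvSegs]
  | cons p r ih =>
    rw [pvResets_cons]
    set R := ((PySem.List.enumerate r 0).filter (fun ip => pvReset tn ip.2)).map (·.1) with hR
    set P := fun b => PySem.List.pyGetD (pvPres ((p :: r).map (pvScore tn))) b 0 with hP
    set Q := fun b => PySem.List.pyGetD (pvPres (r.map (pvScore tn))) b 0 with hQ
    set s := pvScore tn p with hs
    have hlen : ((p :: r).length : Int) = (r.length : Int) + 1 := by push_cast [List.length_cons]; ring
    have hshift : ∀ b ∈ (0 : Int) :: (R.map (· + 1) ++ [(r.length : Int)]), P (b + 1) = s + Q b := by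
      intro b hbmem
      have hb : 0 ≤ b ∧ b ≤ (r.length : Int) := by
        rcases List.mem_cons.mp hbmem with h | h
        · subst h; exact ⟨le_refl 0, by exact_mod_cast Nat.zero_le r.length⟩
        · rcases List.mem_append.mp h with h | h
          · rcases List.mem_map.mp h with ⟨b0, hb0, rfl⟩
            have := pvResets_mem tn r b0 hb0
            omega
          · simp at h; subst h; exact ⟨by exact_mod_cast Nat.zero_le r.length, le_refl _⟩
      show PySem.List.pyGetD (pvPres ((p :: r).map (pvScore tn))) (b + 1) 0 = s + Q b
      rw [List.map_cons]
      exact pvPres_succ (pvScore tn p) (r.map (pvScore tn)) b hb.1 (by simpa using hb.2)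
    have hP0 : P 0 = 0 := pvPres_zero _
    have hQ0 : Q 0 = 0 := pvPres_zero _
    unfold pvSegs
    by_cases hsc : pvScoring tn p = true
    · -- scoring: not a reset
      have hres : pvReset tn p = false := by unfold pvReset; simp [hsc]
      have hsval : s = p.2 := by rw [hs]; unfold pvScore; simp [hsc]
      simp only [hres, Bool.false_eq_true, if_false, List.nil_append, hsc, if_true, hlen]
      -- bounds = 0 :: (R.map(+1) ++ [len r]).map (+1)
      cases hT : R.map (· + 1) ++ [(r.length : Int)] with
      | nil => exact absurd hT (by simp)
      | cons b0 T =>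
        have hmapT : (R.map (· + 1)).map (· + 1) ++ [(r.length : Int) + 1] = (b0 + 1) :: T.map (· + 1) := by
          have h := congrArg (List.map (· + 1)) hT
          simp only [List.map_append, List.map_cons, List.map_nil] at h
          exact h
        rw [hmapT]
        show (P (b0 + 1) - P 0) :: pvDD P ((b0 + 1) :: T.map (· + 1)) = _
        have hddP : pvDD P ((b0 :: T).map (· + 1)) = pvDD Q (b0 :: T) :=
          pvDD_shift P Q s (b0 :: T) (by intro b hb; exact hshift b (by rw [hT] at *; simp [List.mem_cons] at hb ⊢; tauto))
        have hih := ih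
        rw [hT] at hih
        have hQb0 : Q b0 = (pvSegs tn r).1 ∧ pvDD Q (b0 :: T) = (pvSegs tn r).2 := by
          have : pvDD Q (0 :: b0 :: T) = (Q b0 - Q 0) :: pvDD Q (b0 :: T) := rfl
          rw [this] at hih
          have h1 := (List.cons.injEq _ _ _ _).mp hih
          exact ⟨by have := h1.1; rw [hQ0] at this; omega, h1.2⟩
        simp only [List.map_cons] at hddP
        rw [hddP, hshift b0 (by rw [hT]; simp), hP0, hQb0.1, hQb0.2]
        congr 1
        omega
    · by_cases hres : pvReset tn p = true
      · -- reset: s = 0, new head segment 0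
        have hs0 : s = 0 := by rw [hs]; unfold pvScore; simp [hsc]
        simp only [hres, if_true, hsc, Bool.false_eq_true, if_false, hlen]
        have hmap : ([(0 : Int)] ++ R.map (· + 1)).map (· + 1) ++ [(r.length : Int) + 1]
            = ((0 : Int) :: (R.map (· + 1) ++ [(r.length : Int)])).map (· + 1) := by
          simp [List.map_map]
        rw [hmap]
        have hcons : ((0 : Int) :: (R.map (· + 1) ++ [(r.length : Int)])).map (· + 1)
            = (0 + 1) :: (R.map (· + 1) ++ [(r.length : Int)]).map (· + 1) := by simp
        rw [hcons]
        show (P (0 + 1) - P 0) :: pvDD P ((0 + 1) :: (R.map (· + 1) ++ [(r.length : Int)]).map (· + 1)) = _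
        have : (0 + 1 : Int) :: (R.map (· + 1) ++ [(r.length : Int)]).map (· + 1)
            = ((0 : Int) :: (R.map (· + 1) ++ [(r.length : Int)])).map (· + 1) := by simp
        rw [this, pvDD_shift P Q s _ hshift, ih]
        rw [hshift 0 (by simp), hP0, hQ0, hs0]
        norm_num
      · -- skip: s = 0, not a reset boundary
        have hs0 : s = 0 := by rw [hs]; unfold pvScore; simp [hsc]
        simp only [hres, Bool.false_eq_true, if_false, List.nil_append, hsc, hlen]
        cases hT : R.map (· + 1) ++ [(r.length : Int)] with
        | nil => exact absurd hT (by simp)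
        | cons b0 T =>
          have hmapT : (R.map (· + 1)).map (· + 1) ++ [(r.length : Int) + 1] = (b0 + 1) :: T.map (· + 1) := by
            have h := congrArg (List.map (· + 1)) hT
            simp only [List.map_append, List.map_cons, List.map_nil] at h
            exact h
          rw [hmapT]
          show (P (b0 + 1) - P 0) :: pvDD P ((b0 + 1) :: T.map (· + 1)) = _
          have hddP : pvDD P ((b0 :: T).map (· + 1)) = pvDD Q (b0 :: T) :=
            pvDD_shift P Q s (b0 :: T) (by intro b hb; exact hshift b (by rw [hT] at *; simp [List.mem_cons] at hb ⊢; tauto))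
          have hih := ih
          rw [hT] at hih
          have hQb0 : Q b0 = (pvSegs tn r).1 ∧ pvDD Q (b0 :: T) = (pvSegs tn r).2 := by
            have : pvDD Q (0 :: b0 :: T) = (Q b0 - Q 0) :: pvDD Q (b0 :: T) := rfl
            rw [this] at hih
            have h1 := (List.cons.injEq _ _ _ _).mp hih
            exact ⟨by have := h1.1; rw [hQ0] at this; omega, h1.2⟩
          simp only [List.map_cons] at hddP
          rw [hddP, hshift b0 (by rw [hT]; simp), hP0, hQb0.1, hQb0.2]
          congr 1
          omega

-- ===== VERDICT (by name: the statement is the Claim_ definition above) =====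
theorem max_scoring_run_py_spec : Claim_equal_max_scoring_run_py := by
  unfold Claim_equal_max_scoring_run_py
  intro events team_name _ _
  unfold Spec_max_scoring_run_py max_scoring_run_py max_scoring_run_py_alt
  set pairs := events.map (fun e => (pvTeam e, pvPts e)) with hpairs
  -- A side
  have hA := pvA_char team_name (events.map (fun e => (pvTeam e, pvPts e))) 0 0 (le_refl 0) (le_refl 0)
  simp only [List.foldl_map] at hA
  rw [hA]
  -- B side
  simp only
  rw [pvPres_eq,
    pvZip_dd (fun b => PySem.List.pyGetD (pvPres (pairs.map (pvScore team_name))) b 0)]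
  have hlen : ((pairs.map (pvScore team_name)).length : Int) = (pairs.length : Int) := by simp
  rw [hlen]
  have hB := pvB_char team_name pairs
  have hbounds : ([(0 : Int)] ++ (((PySem.List.enumerate pairs 0).filter (fun ip => pvReset team_name ip.2)).map (·.1)).map (· + 1) ++ [(pairs.length : Int)])
      = ((0 : Int) :: ((((PySem.List.enumerate pairs 0).filter (fun ip => pvReset team_name ip.2)).map (·.1)).map (· + 1) ++ [(pairs.length : Int)])) := by simp
  rw [hbounds, hB, PySem.List.max?_id_cons, Option.getD_some]
  have hh : max 0 (0 + (pvSegs team_name pairs).1) = (pvSegs team_name pairs).1 := by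
    have := (pvSegs_nonneg team_name pairs).1
    omega
  rw [hh]
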